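-- pv_equiv track=rewrite | github.com/Patxi91/CodeWars_Cloud | 4kyu-Balanced parentheses string-Patxi.py | balanced_parens5
-- ===== SOURCE A (Python) =====
-- def balanced_parens5(n, k):
--     if k < 0 or k >= binomial_coefficient(2*n, n):
--         return None
--
--     result = ['(']
--     num_left_parens = 1
--     num_right_parens = 0
--
--     for i in range(2*n - 1):
--         if num_left_parens < n:
--             num_sequences = binomial_coefficient(2*n - i - 2, n - num_left_parens - 1)
--             if k < num_sequences:
--                 result.append('(')
--                 num_left_parens += 1
--             else:
--                 result.append(')')
--                 num_right_parens += 1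
--                 k -= num_sequences
--         else:
--             result.append(')')
--             num_right_parens += 1
--
--     return ''.join(result)
--
-- def binomial_coefficient(n, k):
--     """Compute the binomial coefficient C(n, k)"""
--     if k > n:
--         return 0
--     result = 1
--     for i in range(k):
--         result *= (n - i)
--         result //= (i + 1)
--     return result
-- ===== SOURCE B (Python) =====
-- def balanced_parens5(n, k):
--     # Same rank-walk, but the binomial count is maintained incrementally
--     # (one exact ratio update per step) instead of recomputed from scratch.
--     if n < 0 or k < 0:
--         return None
--     total = 1
--     for i in range(n):
--         total = total * (2*n - i) // (i + 1)
--     if k >= total: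
--         return None
--     c = 0
--     if n >= 1:
--         c = total * n // (2*n)          # C(2n-1, n-1)
--         c = c * (n - 1) // (2*n - 1)    # C(2n-2, n-2)
--     out = ['(']
--     left = 1
--     for i in range(2*n - 1):
--         if left < n:
--             m = 2*n - i - 2
--             r = n - left - 1
--             if k < c:
--                 out.append('(')
--                 left += 1
--                 if m > 0:
--                     c = c * r // m
--             else:
--                 out.append(')')
--                 k -= c
--                 if m > 0:
--                     c = c * (m - r) // m
--         else:
--             out.append(')')
--     return ''.join(out)
-- ===== Notes on version B (the rewrite author's own statement) =====
-- stated objective: faster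
-- what changed: B keeps the walk's binomial count in a running variable updated by one exact multiply/divide ratio step per position, instead of A's call to an O(n) binomial_coefficient helper at every step; the total is computed once up front.
import Mathlib
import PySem

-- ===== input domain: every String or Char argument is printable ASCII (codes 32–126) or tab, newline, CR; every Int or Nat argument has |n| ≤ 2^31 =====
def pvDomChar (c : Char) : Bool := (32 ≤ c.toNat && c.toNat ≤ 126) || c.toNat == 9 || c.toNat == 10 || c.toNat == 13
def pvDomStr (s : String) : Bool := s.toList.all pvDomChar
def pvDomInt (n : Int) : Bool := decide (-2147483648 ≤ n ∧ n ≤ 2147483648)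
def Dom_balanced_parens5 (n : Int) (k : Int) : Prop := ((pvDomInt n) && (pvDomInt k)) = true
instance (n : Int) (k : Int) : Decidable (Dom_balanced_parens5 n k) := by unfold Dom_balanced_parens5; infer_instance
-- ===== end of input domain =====

-- B maintains the walk's binomial count incrementally (one exact ratio update per step)
-- instead of A's recomputation of the binomial from scratch at every step.

-- ===== PORT A =====
-- helper: A's binomial_coefficient(n, k)
def pvBinom (n : Int) (k : Int) : Int :=
  if k > n then 0
  else (PySem.List.pyRange 0 k 1).foldl
    (fun result i => PySem.Int.floordiv (result * (n - i)) (i + 1)) 1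

-- A's loop body, one iteration of the walk
def pvStepA (n : Int) (st : List Char × Int × Int × Int) (i : Int) :
    List Char × Int × Int × Int :=
  let (res, nl, nr, kk) := st
  if nl < n then
    let ns := pvBinom (2*n - i - 2) (n - nl - 1)
    if kk < ns then (res ++ ['('], nl + 1, nr, kk)
    else (res ++ [')'], nl, nr + 1, kk - ns)
  else (res ++ [')'], nl, nr + 1, kk)

def balanced_parens5 (n : Int) (k : Int) : Option String :=
  if k < 0 ∨ k ≥ pvBinom (2*n) n then none
  else
    let st := (PySem.List.pyRange 0 (2*n - 1) 1).foldl (pvStepA n) (['('], 1, 0, k)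
    some (String.ofList st.1)

-- ===== PORT B =====
-- B's loop body: state (out, left, c, k), c updated by an exact ratio step
def pvStepB (n : Int) (st : List Char × Int × Int × Int) (i : Int) :
    List Char × Int × Int × Int :=
  let (out, left, c, kk) := st
  if left < n then
    let m := 2*n - i - 2
    let r := n - left - 1
    if kk < c then
      (out ++ ['('], left + 1,
       (if m > 0 then PySem.Int.floordiv (c * r) m else c), kk)
    else
      (out ++ [')'], left,
       (if m > 0 then PySem.Int.floordiv (c * (m - r)) m else c), kk - c)
  else (out ++ [')'], left, c, kk)

def balanced_parens5_alt (n : Int) (k : Int) : Option String :=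
  if n < 0 ∨ k < 0 then none
  else
    let total := (PySem.List.pyRange 0 n 1).foldl
      (fun t i => PySem.Int.floordiv (t * (2*n - i)) (i + 1)) 1
    if k ≥ total then none
    else
      let c : Int :=
        if n ≥ 1 then
          PySem.Int.floordiv
            (PySem.Int.floordiv (total * n) (2*n) * (n - 1)) (2*n - 1)
        else 0
      let st := (PySem.List.pyRange 0 (2*n - 1) 1).foldl (pvStepB n) (['('], 1, c, k)
      some (String.ofList st.1)

-- ===== PRECONDITION & SPEC =====
def Spec_balanced_parens5 (n : Int) (k : Int) (out : Option String) : Prop := out = balanced_parens5_alt n k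
instance (n : Int) (k : Int) (out : Option String) : Decidable (Spec_balanced_parens5 n k out) := by unfold Spec_balanced_parens5; infer_instance

-- ===== CLAIM (what is proved, stated in full; the proofs are below) =====
def Claim_equal_balanced_parens5 : Prop := ∀ (n : Int) (k : Int), Dom_balanced_parens5 n k → Spec_balanced_parens5 n k (balanced_parens5 n k)

-- ===== LEMMAS AND PROOFS =====

-- Int-valued binomial via Nat.choose
def pvChoose (m r : Int) : Int := (Nat.choose m.toNat r.toNat : Int)

-- exact floor division
theorem pv_fdiv_exact (q d : Int) (hd : 0 < d) :
    PySem.Int.floordiv (q * d) d = q := by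
  rw [PySem.Int.floordiv_eq_ediv_of_pos hd]
  exact Int.mul_ediv_cancel q (by omega)

-- A's product loop computes choose (prefix invariant)
theorem pvBinom_loop (M : ℕ) (R : ℕ) (hR : R ≤ M) :
    (PySem.List.pyRange 0 (R : Int) 1).foldl
      (fun result i => PySem.Int.floordiv (result * ((M : Int) - i)) (i + 1)) 1
      = (Nat.choose M R : Int) := by
  induction R with
  | zero => simp [PySem.List.pyRange_zero_nat]
  | succ r ih =>
    have hr : r ≤ M := Nat.le_of_succ_le hR
    have hsplit : PySem.List.pyRange 0 ((r : Int) + 1) 1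
        = PySem.List.pyRange 0 (r : Int) 1 ++ [(r : Int)] :=
      PySem.List.pyRange_one_succ_right (by positivity)
    have : ((r : Int) + 1) = ((r + 1 : ℕ) : Int) := by push_cast; ring
    rw [← this, hsplit, List.foldl_append, ih hr]
    simp only [List.foldl_cons, List.foldl_nil]
    have hid : (Nat.choose M r : Int) * ((M : Int) - (r : Int))
        = (Nat.choose M (r + 1) : Int) * ((r : Int) + 1) := by
      have := Nat.choose_succ_right_eq M r
      have hsub : ((M - r : ℕ) : Int) = (M : Int) - (r : Int) := by
        push_cast [Nat.cast_sub hr]; ring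
      calc (Nat.choose M r : Int) * ((M : Int) - (r : Int))
          = ((Nat.choose M r * (M - r) : ℕ) : Int) := by push_cast [hsub]; ring
        _ = ((Nat.choose M (r + 1) * (r + 1) : ℕ) : Int) := by rw [← this]
        _ = (Nat.choose M (r + 1) : Int) * ((r : Int) + 1) := by push_cast; ring
    rw [hid, pv_fdiv_exact _ _ (by positivity)]

theorem pvBinom_eq (m r : Int) (hr : 0 ≤ r) (hm : 0 ≤ m) :
    pvBinom m r = pvChoose m r := by
  unfold pvBinom pvChoose
  by_cases h : r > m
  · rw [if_pos h]
    have : m.toNat < r.toNat := by omega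
    rw [Nat.choose_eq_zero_of_lt this]; simp
  · rw [if_neg h]
    have h1 : r = (r.toNat : Int) := by omega
    have h2 : m = (m.toNat : Int) := by omega
    rw [h1, h2] at *
    exact pvBinom_loop m.toNat r.toNat (by omega)

-- C(m,r)*r = C(m-1,r-1)*m  (as Ints, for m ≥ 1, r ≥ 1)
theorem pv_id_left (m r : Int) (hm : 1 ≤ m) (hr : 1 ≤ r) :
    pvChoose m r * r = pvChoose (m - 1) (r - 1) * m := by
  unfold pvChoose
  obtain ⟨M, hM⟩ : ∃ M : ℕ, m = (M : Int) + 1 := ⟨(m - 1).toNat, by omega⟩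
  obtain ⟨R, hR⟩ : ∃ R : ℕ, r = (R : Int) + 1 := ⟨(r - 1).toNat, by omega⟩
  subst hM hR
  have h1 : ((M : Int) + 1).toNat = M + 1 := by omega
  have h2 : ((R : Int) + 1).toNat = R + 1 := by omega
  have h3 : ((M : Int) + 1 - 1).toNat = M := by omega
  have h4 : ((R : Int) + 1 - 1).toNat = R := by omega
  rw [h1, h2, h3, h4]
  have key : (Nat.choose (M + 1) (R + 1) * (R + 1) : ℕ) = ((M + 1) * Nat.choose M R : ℕ) :=
    (Nat.add_one_mul_choose_eq M R).symm
  calc (Nat.choose (M + 1) (R + 1) : Int) * ((R : Int) + 1)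
      = ((Nat.choose (M + 1) (R + 1) * (R + 1) : ℕ) : Int) := by push_cast; ring
    _ = (((M + 1) * Nat.choose M R : ℕ) : Int) := by rw [key]
    _ = (Nat.choose M R : Int) * ((M : Int) + 1) := by push_cast; ring

-- C(m,r)*(m-r) = C(m-1,r)*m  (as Ints, for m ≥ 1, 0 ≤ r)
theorem pv_id_right (m r : Int) (hm : 1 ≤ m) (hr : 0 ≤ r) :
    pvChoose m r * (m - r) = pvChoose (m - 1) r * m := by
  unfold pvChoose
  obtain ⟨M, hM⟩ : ∃ M : ℕ, m = (M : Int) + 1 := ⟨(m - 1).toNat, by omega⟩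
  obtain ⟨R, hR⟩ : ∃ R : ℕ, r = (R : Int) := ⟨r.toNat, by omega⟩
  subst hM hR
  have h1 : ((M : Int) + 1).toNat = M + 1 := by omega
  have h3 : ((M : Int) + 1 - 1).toNat = M := by omega
  have h4 : ((R : Int)).toNat = R := by omega
  rw [h1, h3, h4]
  by_cases hle : R ≤ M
  · -- use (M+1)*C(M, M-R) = C(M+1, M-R+1)*(M-R+1) and symmetry
    have key := Nat.add_one_mul_choose_eq M (M - R)
    have s1 : Nat.choose M (M - R) = Nat.choose M R := Nat.choose_symm hle
    have s2 : Nat.choose (M + 1) (M - R + 1) = Nat.choose (M + 1) R := by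
      have h5 : M - R + 1 = (M + 1) - R := by omega
      rw [h5, Nat.choose_symm (by omega)]
    rw [s1, s2] at key
    have h5 : M - R + 1 = M + 1 - R := by omega
    rw [h5] at key
    have hnat : Nat.choose (M + 1) R * (M + 1 - R) = Nat.choose M R * (M + 1) := by
      rw [← key, Nat.mul_comm]
    calc (Nat.choose (M + 1) R : Int) * ((M : Int) + 1 - (R : Int))
        = ((Nat.choose (M + 1) R * (M + 1 - R) : ℕ) : Int) := by
          push_cast [Nat.cast_sub (by omega : R ≤ M + 1)]; ring
      _ = ((Nat.choose M R * (M + 1) : ℕ) : Int) := by rw [hnat]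
      _ = (Nat.choose M R : Int) * ((M : Int) + 1) := by push_cast; ring
  · -- R > M: both choose values vanish or the factor does
    by_cases hR1 : R ≤ M + 1
    · have hRM : R = M + 1 := by omega
      subst hRM
      rw [Nat.choose_eq_zero_of_lt (show M < M + 1 by omega)]
      simp
    · rw [Nat.choose_eq_zero_of_lt (show M + 1 < R by omega),
        Nat.choose_eq_zero_of_lt (show M < R by omega)]
      simp

-- the main walk invariant: from index i on, the two folds produce equal first
-- components (B's c equals the current binomial whenever left < n)
theorem pv_walk (n : Int) (hn : 1 ≤ n) :
    ∀ (d : ℕ) (i : Int), 0 ≤ i → i + d = 2*n - 1 →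
    ∀ (res : List Char) (l nr kk c : Int), 1 ≤ l → l ≤ n →
    (l < n → c = pvChoose (2*n - i - 2) (n - l - 1)) →
    ((PySem.List.pyRange i (2*n - 1) 1).foldl (pvStepA n) (res, l, nr, kk)).1
      = ((PySem.List.pyRange i (2*n - 1) 1).foldl (pvStepB n) (res, l, c, kk)).1 := by
  intro d
  induction d with
  | zero =>
    intro i hi hie res l nr kk c _ _ _
    rw [PySem.List.pyRange_one_eq_nil (by omega)]
    rfl
  | succ d ih =>
    intro i hi hie res l nr kk c hl1 hln hc
    have hib : i < 2*n - 1 := by omega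
    rw [PySem.List.pyRange_one_cons hib]
    simp only [List.foldl_cons]
    by_cases hlt : l < n
    · have hceq := hc hlt
      have hbin : pvBinom (2*n - i - 2) (n - l - 1) = c := by
        rw [pvBinom_eq _ _ (by omega) (by omega), hceq]
      unfold pvStepA pvStepB
      simp only [if_pos hlt, hbin]
      by_cases hend : i + 1 = 2*n - 1
      · -- last iteration: the remaining range is empty, only res matters
        rw [PySem.List.pyRange_one_eq_nil (by omega : 2*n - 1 ≤ i + 1)]
        by_cases hk : kk < c
        · simp only [if_pos hk]
          rfl
        · simp only [if_neg hk]
          rfl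
      · have hm : 2*n - i - 2 > 0 := by omega
        by_cases hk : kk < c
        · simp only [if_pos hk]
          apply ih (i + 1) (by omega) (by omega) _ _ nr _ _ (by omega) (by omega)
          intro hlt'
          rw [if_pos hm, hceq,
            show pvChoose (2*n - i - 2) (n - l - 1) * (n - l - 1)
              = pvChoose (2*n - (i+1) - 2) (n - (l+1) - 1) * (2*n - i - 2) from by
              have := pv_id_left (2*n - i - 2) (n - l - 1) (by omega) (by omega)
              convert this using 3 <;> ring,
            pv_fdiv_exact _ _ (by omega)]
        · simp only [if_neg hk]
          apply ih (i + 1) (by omega) (by omega) _ _ (nr + 1) _ _ (by omega) (by omega)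
          intro hlt'
          rw [if_pos hm, hceq,
            show pvChoose (2*n - i - 2) (n - l - 1) * (2*n - i - 2 - (n - l - 1))
              = pvChoose (2*n - (i+1) - 2) (n - l - 1) * (2*n - i - 2) from by
              have := pv_id_right (2*n - i - 2) (n - l - 1) (by omega) (by omega)
              convert this using 3 <;> ring,
            pv_fdiv_exact _ _ (by omega)]
    · unfold pvStepA pvStepB
      simp only [if_neg hlt]
      exact ih (i + 1) (by omega) (by omega) _ _ (nr + 1) _ _ hl1 hln
        (fun h => absurd h (by omega))

-- the two programs agree on every input
theorem pv_final (n k : Int) : balanced_parens5 n k = balanced_parens5_alt n k := by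
  unfold balanced_parens5 balanced_parens5_alt
  by_cases hneg : n < 0 ∨ k < 0
  · rw [if_pos hneg]
    rcases hneg with hneg | hneg
    · have h0 : pvBinom (2*n) n = 0 := by
        unfold pvBinom; rw [if_pos (by omega)]
      rw [h0, if_pos (by omega : k < 0 ∨ k ≥ (0:Int))]
    · rw [if_pos (Or.inl hneg)]
  · rw [if_neg hneg]
    push_neg at hneg
    have htot : (PySem.List.pyRange 0 n 1).foldl
        (fun t i => PySem.Int.floordiv (t * (2*n - i)) (i + 1)) 1 = pvBinom (2*n) n := by
      unfold pvBinom; rw [if_neg (by omega)]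
    simp only [htot]
    by_cases hg : k ≥ pvBinom (2*n) n
    · rw [if_pos (Or.inr hg), if_pos hg]
    · rw [if_neg (by omega : ¬(k < 0 ∨ k ≥ pvBinom (2*n) n)), if_neg hg]
      by_cases hn0 : n = 0
    -- n = 0: the walk is empty on both sides
      · subst hn0
        rw [PySem.List.pyRange_one_eq_nil (by omega : 2*(0:Int) - 1 ≤ 0)]
        simp
      · have hn1 : 1 ≤ n := by omega
        have hch : pvBinom (2*n) n = pvChoose (2*n) n := pvBinom_eq _ _ (by omega) (by omega)
        -- B's initial c equals C(2n-2, n-2) whenever it is read (1 < n)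
        have hc1 : PySem.Int.floordiv (pvBinom (2*n) n * n) (2*n) = pvChoose (2*n - 1) (n - 1) := by
          rw [hch, show pvChoose (2*n) n * n = pvChoose (2*n - 1) (n - 1) * (2*n) from
            pv_id_left (2*n) n (by omega) (by omega), pv_fdiv_exact _ _ (by omega)]
        have hcinit : 1 < n →
            PySem.Int.floordiv (PySem.Int.floordiv (pvBinom (2*n) n * n) (2*n) * (n - 1)) (2*n - 1)
              = pvChoose (2*n - 0 - 2) (n - 1 - 1) := by
          intro h2
          rw [hc1, show pvChoose (2*n - 1) (n - 1) * (n - 1)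
              = pvChoose (2*n - 0 - 2) (n - 1 - 1) * (2*n - 1) from by
            have := pv_id_left (2*n - 1) (n - 1) (by omega) (by omega)
            convert this using 3 <;> ring, pv_fdiv_exact _ _ (by omega)]
        rw [if_pos (by omega : n ≥ (1:Int))]
        have := pv_walk n hn1 (2*n - 1).toNat 0 (by omega) (by omega)
          ['('] 1 0 k
          (PySem.Int.floordiv (PySem.Int.floordiv (pvBinom (2*n) n * n) (2*n) * (n - 1)) (2*n - 1))
          (by omega) (by omega) hcinit
        rw [this]

-- ===== VERDICT (by name: the statement is the Claim_ definition above) =====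
theorem balanced_parens5_spec : Claim_equal_balanced_parens5 := by
  intro n k _
  unfold Spec_balanced_parens5
  exact pv_final n k
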